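-- pv_equiv track=rewrite | github.com/nikitarub/uburu | uburu/utext/core/parser.py | parse_into_words
-- ===== SOURCE A (Python) =====
-- def del_free_lines(data):
--     data_ret = []
--     for i in data:
--         if (i[-1] == ('\n' or '\r')) or (i[-1] == ' '):
--             i = i[:-1]
--         data_ret.append(i)
--     return data_ret
--
-- def parse_into_words(text):
--     text += ' '
--     word = ''
--     data = []
--     for i in text:
--         word += i
--         if i == ' ' or i == '\n':
--             data.append(word)
--             word = ''
--     data = del_free_lines(data)
--
--     return data
-- ===== SOURCE B (Python) =====
-- def parse_into_words(text):
--     # Normalise newlines to spaces and let str.split(' ') (which keeps empty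
--     # segments) do the traversal; A's manual loop + del_free_lines does the same.
--     return text.replace('\n', ' ').split(' ')
-- ===== Notes on version B (the rewrite author's own statement) =====
-- stated objective: idiomatic
-- what changed: Replaces the manual character loop with word accumulation plus the del_free_lines delimiter-stripping pass by a single expression that normalises newlines to spaces and delegates to str.split(' '), which keeps empty segments exactly as A does.
import Mathlib
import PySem

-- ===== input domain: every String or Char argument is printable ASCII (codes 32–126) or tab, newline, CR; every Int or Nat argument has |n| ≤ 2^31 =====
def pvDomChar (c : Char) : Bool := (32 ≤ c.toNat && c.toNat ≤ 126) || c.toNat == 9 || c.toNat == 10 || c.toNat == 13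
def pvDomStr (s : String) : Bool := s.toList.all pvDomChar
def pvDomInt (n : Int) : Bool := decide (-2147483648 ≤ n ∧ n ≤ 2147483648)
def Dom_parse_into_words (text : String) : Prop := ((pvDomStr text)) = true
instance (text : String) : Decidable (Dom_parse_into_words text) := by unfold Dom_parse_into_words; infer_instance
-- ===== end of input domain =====

-- B replaces A's manual character loop plus del_free_lines stripping pass by
-- newline-normalisation followed by the library split on ' ' (idiomatic, same cost).

-- ===== PORT A =====
-- del_free_lines: Python's `('\n' or '\r')` evaluates to '\n', so the test is
-- i[-1] == '\n' or i[-1] == ' '; i[:-1] is a slice.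
def pv_delFreeLines (data : List String) : List String :=
  data.foldl (fun data_ret i =>
    let i := if (PySem.Str.pyGet? i (-1) == some '\n') || (PySem.Str.pyGet? i (-1) == some ' ')
             then PySem.Str.slice i none (some (-1)) else i
    data_ret ++ [i]) []

def parse_into_words (text : String) : List String :=
  let text := text ++ " "
  let st := text.toList.foldl
    (fun (st : String × List String) i =>
      let word := st.1.push i
      if i = ' ' || i = '\n' then ("", st.2 ++ [word]) else (word, st.2))
    ("", ([] : List String))
  pv_delFreeLines st.2

-- ===== PORT B =====
-- text.replace('\n', ' ').split(' '); the separator " " is never empty, so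
-- split? always returns some — .getD [] is only a totality guard.
def parse_into_words_alt (text : String) : List String :=
  (PySem.Str.split? (PySem.Str.replace text "\n" " ") " ").getD []

-- ===== PRECONDITION & SPEC =====
def Spec_parse_into_words (text : String) (out : List String) : Prop := out = parse_into_words_alt text
instance (text : String) (out : List String) : Decidable (Spec_parse_into_words text out) := by unfold Spec_parse_into_words; infer_instance

-- ===== CLAIM (what is proved, stated in full; the proofs are below) =====
def Claim_equal_parse_into_words : Prop := ∀ (text : String), Dom_parse_into_words text → Spec_parse_into_words text (parse_into_words text)

-- ===== LEMMAS AND PROOFS =====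

def pvDelim (c : Char) : Bool := c = ' ' || c = '\n'

def pvRepl (c : Char) : Char := if c = '\n' then ' ' else c

-- split at ' ' only, keeping empty segments (what str.split(' ') computes)
def pvSplit : List Char → List (List Char)
  | [] => [[]]
  | c :: rest =>
    if c = ' ' then [] :: pvSplit rest
    else match pvSplit rest with
      | [] => [[c]]
      | w :: ws => (c :: w) :: ws

-- split at ' ' or '\n', keeping empty segments
def pvSplit2 : List Char → List (List Char)
  | [] => [[]]
  | c :: rest =>
    if pvDelim c then [] :: pvSplit2 rest
    else match pvSplit2 rest with
      | [] => [[c]]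
      | w :: ws => (c :: w) :: ws

def pvConsHead (w : List Char) : List (List Char) → List (List Char)
  | [] => [w]
  | x :: xs => (w ++ x) :: xs

-- delimiter-terminated segments (each including its delimiter); a trailing
-- delimiter-free run is dropped
def pvSegs : List Char → List (List Char)
  | [] => []
  | c :: rest =>
    if pvDelim c then [c] :: pvSegs rest
    else match pvSegs rest with
      | [] => []
      | s :: ss => (c :: s) :: ss

-- A's main loop, word accumulator w
def pvSegsFrom (w : String) : List Char → List String
  | [] => []
  | c :: rest =>
    if pvDelim c then (w.push c) :: pvSegsFrom "" rest
    else pvSegsFrom (w.push c) rest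

theorem pvFoldA (l : List Char) : ∀ (w : String) (d : List String),
    (l.foldl (fun (st : String × List String) i =>
      let word := st.1.push i
      if i = ' ' || i = '\n' then ("", st.2 ++ [word]) else (word, st.2)) (w, d)).2
    = d ++ pvSegsFrom w l := by
  induction l with
  | nil => intro w d; simp [pvSegsFrom]
  | cons c rest ih =>
    intro w d
    have ih' := ih
    simp only [Bool.or_eq_true, decide_eq_true_eq] at ih'
    by_cases h : c = ' ' ∨ c = '\n'
    · have hd : pvDelim c = true := by rcases h with rfl | rfl <;> simp [pvDelim]
      simp only [List.foldl_cons, Bool.or_eq_true, decide_eq_true_eq, h, if_true]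
      simp [hd, pvSegsFrom, ih' "" (d ++ [w.push c])]
    · have h1 : c ≠ ' ' := fun hc => h (Or.inl hc)
      have h2 : c ≠ '\n' := fun hc => h (Or.inr hc)
      have hd : pvDelim c = false := by simp [pvDelim, h1, h2]
      simp [h1, h2, hd, pvSegsFrom, ih' (w.push c) d]

theorem pvSegsFrom_toList (l : List Char) : ∀ w : String,
    (pvSegsFrom w l).map String.toList
    = match pvSegs l with
      | [] => []
      | s :: ss => (w.toList ++ s) :: ss := by
  induction l with
  | nil => intro w; simp [pvSegsFrom, pvSegs]
  | cons c rest ih =>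
    intro w
    by_cases h : pvDelim c
    · simp only [pvSegsFrom, pvSegs, h, if_pos, List.map_cons]
      have h2 := ih ""
      rcases hr : pvSegs rest with _ | ⟨s, ss⟩ <;>
        simp_all [String.toList_push]
    · simp only [pvSegsFrom, pvSegs, h, if_neg, Bool.false_eq_true, not_false_iff]
      have h2 := ih (w.push c)
      rcases hr : pvSegs rest with _ | ⟨s, ss⟩ <;>
        simp_all [String.toList_push]

theorem pvSegs_last {l : List Char} : ∀ s ∈ pvSegs l, ∃ c, s.getLast? = some c ∧ pvDelim c = true := by
  induction l with
  | nil => simp [pvSegs]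
  | cons c rest ih =>
    intro s hs
    by_cases h : pvDelim c
    · simp only [pvSegs, h, if_pos, List.mem_cons] at hs
      rcases hs with rfl | hs
      · exact ⟨c, rfl, h⟩
      · exact ih s hs
    · simp only [pvSegs, h, if_neg, Bool.false_eq_true, not_false_iff] at hs
      rcases hr : pvSegs rest with _ | ⟨t, ts⟩
      · simp [hr] at hs
      · rw [hr] at hs
        rcases List.mem_cons.mp hs with rfl | hmem
        · have ht := ih t (by rw [hr]; exact List.mem_cons_self)
          rcases ht with ⟨d, hd, hdel⟩
          refine ⟨d, ?_, hdel⟩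
          rcases t with _ | ⟨x, xs⟩
          · simp at hd
          · rw [List.getLast?_cons_cons]; exact hd
        · exact ih _ (by rw [hr]; exact List.mem_cons_of_mem _ hmem)

theorem pvSegs_append_ne_nil (l : List Char) : pvSegs (l ++ [' ']) ≠ [] := by
  induction l with
  | nil => simp [pvSegs, pvDelim]
  | cons c rest ih =>
    by_cases h : pvDelim c
    · simp [pvSegs, h]
    · simp only [List.cons_append, pvSegs, h, if_neg, Bool.false_eq_true, not_false_iff]
      rcases hr : pvSegs (rest ++ [' ']) with _ | ⟨s, ss⟩
      · exact absurd hr ih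
      · simp

theorem pvStrip_eq_split2 (l : List Char) :
    (pvSegs (l ++ [' '])).map List.dropLast = pvSplit2 l := by
  induction l with
  | nil => simp [pvSegs, pvSplit2, pvDelim]
  | cons c rest ih =>
    by_cases h : pvDelim c
    · simp [pvSegs, pvSplit2, h, ih]
    · simp only [List.cons_append, pvSegs, pvSplit2, h, if_neg, Bool.false_eq_true, not_false_iff]
      rcases hr : pvSegs (rest ++ [' ']) with _ | ⟨s, ss⟩
      · exact absurd hr (pvSegs_append_ne_nil rest)
      · have hsne : s ≠ [] := by
          have := pvSegs_last s (by rw [hr]; exact List.mem_cons_self)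
          rcases this with ⟨d, hd, _⟩
          rintro rfl; simp at hd
        have hspl : pvSplit2 rest = s.dropLast :: ss.map List.dropLast := by
          rw [← ih, hr]; simp
        rw [hspl]
        simp [List.dropLast_cons_of_ne_nil hsne]

theorem pvSplit_ne_nil (l : List Char) : pvSplit l ≠ [] := by
  cases l with
  | nil => simp [pvSplit]
  | cons c rest =>
    simp only [pvSplit]
    split
    · simp
    · rcases pvSplit rest with _ | ⟨w, ws⟩ <;> simp

theorem pvReplaceGo (l : List Char) : ∀ (fuel : Nat) (acc : List Char), l.length ≤ fuel →
    PySem.Chars.replace.go ['\n'] [' '] fuel l acc = acc.reverse ++ l.map pvRepl := by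
  induction l with
  | nil =>
    intro fuel acc _
    cases fuel <;> simp [PySem.Chars.replace.go]
  | cons c rest ih =>
    intro fuel acc hf
    cases fuel with
    | zero => simp at hf
    | succ f =>
      have hf' : rest.length ≤ f := by simpa using hf
      by_cases h : c = '\n'
      · subst h
        rw [PySem.Chars.replace.go]
        simp only [List.isPrefixOf]
        simp [ih f _ hf', pvRepl]
      · rw [PySem.Chars.replace.go]
        have hpre : ['\n'].isPrefixOf (c :: rest) = false := by
          simp [List.isPrefixOf]; exact fun hc => absurd hc.symm h
        simp only [hpre, Bool.false_eq_true, if_neg, not_false_iff]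
        simp [ih f _ hf', pvRepl, h]

theorem pvReplace (l : List Char) :
    PySem.Chars.replace l ['\n'] [' '] = l.map pvRepl := by
  simp [PySem.Chars.replace, pvReplaceGo l l.length [] (le_refl _)]

theorem pvSplitGo (l : List Char) : ∀ (fuel : Nat) (cur : List Char) (acc : List (List Char)), l.length ≤ fuel →
    PySem.Chars.splitOn.go [' '] fuel l cur acc
    = acc.reverse ++ pvConsHead cur.reverse (pvSplit l) := by
  induction l with
  | nil =>
    intro fuel cur acc _
    cases fuel <;> simp [PySem.Chars.splitOn.go.eq_def, pvSplit, pvConsHead]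
  | cons c rest ih =>
    intro fuel cur acc hf
    cases fuel with
    | zero => simp at hf
    | succ f =>
      have hf' : rest.length ≤ f := by simpa using hf
      by_cases h : c = ' '
      · subst h
        rw [PySem.Chars.splitOn.go.eq_def]
        have hpre : [' '].isPrefixOf (' ' :: rest) = true := by simp [List.isPrefixOf]
        simp only [hpre, if_pos, List.length_cons, List.length_nil, List.drop_succ_cons,
          List.drop_zero]
        rw [ih f [] (cur.reverse :: acc) hf']
        rcases hs : pvSplit rest with _ | ⟨w, ws⟩
        · exact absurd hs (pvSplit_ne_nil rest)
        · simp [pvSplit, pvConsHead, hs]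
      · rw [PySem.Chars.splitOn.go.eq_def]
        have hpre : [' '].isPrefixOf (c :: rest) = false := by
          simp [List.isPrefixOf]; exact fun hc => absurd hc.symm h
        simp only [hpre, Bool.false_eq_true, if_neg, not_false_iff]
        rw [ih f (c :: cur) acc hf']
        rcases hs : pvSplit rest with _ | ⟨w, ws⟩
        · exact absurd hs (pvSplit_ne_nil rest)
        · simp [pvSplit, pvConsHead, hs, h]

theorem pvSplitOn (l : List Char) : PySem.Chars.splitOn l [' '] = pvSplit l := by
  rw [PySem.Chars.splitOn, pvSplitGo l (l.length + 1) [] [] (by omega)]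
  rcases hs : pvSplit l with _ | ⟨w, ws⟩
  · exact absurd hs (pvSplit_ne_nil l)
  · simp [pvConsHead]

theorem pvSplit_map_repl (l : List Char) : pvSplit (l.map pvRepl) = pvSplit2 l := by
  induction l with
  | nil => simp [pvSplit, pvSplit2]
  | cons c rest ih =>
    by_cases h : pvDelim c
    · have hr : pvRepl c = ' ' := by
        simp only [pvDelim, Bool.or_eq_true, decide_eq_true_eq] at h
        rcases h with rfl | rfl <;> simp [pvRepl]
      simp [pvSplit, pvSplit2, hr, h, ih]
    · have h' : ¬(c = ' ' ∨ c = '\n') := by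
        simpa [pvDelim] using h
      have hcs : c ≠ ' ' := fun hc => h' (Or.inl hc)
      have hcn : c ≠ '\n' := fun hc => h' (Or.inr hc)
      have hne : pvRepl c = c := by simp [pvRepl, hcn]
      simp only [List.map_cons, pvSplit, pvSplit2, hne, hcs, h, if_neg, Bool.false_eq_true,
        not_false_iff, ih]

def pvStripF (i : String) : String :=
  if (PySem.Str.pyGet? i (-1) == some '\n') || (PySem.Str.pyGet? i (-1) == some ' ')
  then PySem.Str.slice i none (some (-1)) else i

theorem pv_delFreeLines_eq_map (data : List String) :
    pv_delFreeLines data = data.map pvStripF := by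
  unfold pv_delFreeLines pvStripF
  simpa using PySem.List.foldl_append_singleton_eq_map
    (fun i => if (PySem.Str.pyGet? i (-1) == some '\n') || (PySem.Str.pyGet? i (-1) == some ' ')
              then PySem.Str.slice i none (some (-1)) else i) data []

theorem pvSegsFrom_nil_toList (l : List Char) :
    (pvSegsFrom "" l).map String.toList = pvSegs l := by
  have h := pvSegsFrom_toList l ""
  rcases hs : pvSegs l with _ | ⟨s, ss⟩ <;> simp_all

theorem pvStripF_toList (s : String) (c : Char)
    (h : s.toList.getLast? = some c) (hd : pvDelim c = true) :
    (pvStripF s).toList = s.toList.dropLast := by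
  unfold pvStripF
  have hg : PySem.Str.pyGet? s (-1) = some c := by
    rw [PySem.Str.pyGet?]
    simp [PySem.List.pyGet?_neg_one, h]
  simp only [pvDelim, Bool.or_eq_true, decide_eq_true_eq] at hd
  have hc : ((PySem.Str.pyGet? s (-1) == some '\n') || (PySem.Str.pyGet? s (-1) == some ' ')) = true := by
    rw [hg]; rcases hd with rfl | rfl <;> simp
  rw [if_pos hc, PySem.Str.toList_slice]
  simp [PySem.List.slice_to_neg_one]

-- ===== VERDICT (by name: the statement is the Claim_ definition above) =====
theorem parse_into_words_spec : Claim_equal_parse_into_words := by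
  intro text _
  unfold Spec_parse_into_words parse_into_words parse_into_words_alt
  have hL : (text ++ " ").toList = text.toList ++ [' '] := by simp
  have hrep : (PySem.Str.replace text "\n" " ").toList = text.toList.map pvRepl := by
    rw [PySem.Str.toList_replace]
    have h1 : ("\n" : String).toList = ['\n'] := rfl
    have h2 : (" " : String).toList = [' '] := rfl
    rw [h1, h2, pvReplace]
  have hB : (PySem.Str.split? (PySem.Str.replace text "\n" " ") " ").getD []
      = (pvSplit2 text.toList).map String.ofList := by
    rw [PySem.Str.split?]
    have h2 : (" " : String).toList = [' '] := rfl
    rw [h2, PySem.Chars.split?]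
    simp [hrep, pvSplitOn, pvSplit_map_repl]
  rw [hB]
  simp only [hL, pvFoldA, List.nil_append, pv_delFreeLines_eq_map]
  apply List.map_injective_iff.mpr (fun a b => String.toList_injective)
  rw [List.map_map, List.map_map]
  have hcong : (pvSegsFrom "" (text.toList ++ [' '])).map (String.toList ∘ pvStripF)
      = (pvSegsFrom "" (text.toList ++ [' '])).map (List.dropLast ∘ String.toList) := by
    apply List.map_congr_left
    intro x hx
    have hmem : x.toList ∈ pvSegs (text.toList ++ [' ']) := by
      rw [← pvSegsFrom_nil_toList]
      exact List.mem_map_of_mem hx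
    rcases pvSegs_last x.toList hmem with ⟨c, hc, hdel⟩
    simp only [Function.comp_apply]
    exact pvStripF_toList x c hc hdel
  rw [hcong, ← List.map_map, pvSegsFrom_nil_toList, pvStrip_eq_split2]
  simp only [Function.comp_def, String.toList_ofList, List.map_id']
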